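-- pv_equiv track=rewrite | github.com/asolomon4146/Motif-Mark | mm2.py | get_exon_intron_intervals
-- ===== SOURCE A (Python) =====
-- def get_exon_intron_intervals(seq):
--     '''
--     Determines exon and intron intervals.
--     Exons are defined as contiguous uppercase letters,
--     while introns are contiguous lowercase letters.
--     Returns a list of tuples: (start, end, region_type)
--     '''
--     intervals: list = []
--     if not seq:
--         return intervals
--     current_type = 'exon' if seq[0].isupper() else 'intron'
--     start = 0
--     for i, char in enumerate(seq):
--         char_type = 'exon' if char.isupper() else 'intron'
--         if char_type != current_type:
--             intervals.append((start, i, current_type))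
--             start = i
--             current_type = char_type
--     intervals.append((start, len(seq), current_type))
--     return intervals
-- ===== SOURCE B (Python) =====
-- def get_exon_intron_intervals(seq):
--     '''Run-scanning reimplementation: advance over each maximal
--     same-case run at once instead of tracking previous-type state.'''
--     intervals = []
--     pos = 0
--     n = len(seq)
--     while pos < n:
--         up = seq[pos].isupper()
--         end = pos + 1
--         while end < n and seq[end].isupper() == up:
--             end += 1
--         intervals.append((pos, end, 'exon' if up else 'intron'))
--         pos = end
--     return intervals
-- ===== Notes on version B (the rewrite author's own statement) =====
-- stated objective: simpler
-- what changed: Replaced the enumerate-with-previous-type state machine (current_type/start bookkeeping plus a final flush append) by direct scanning of maximal same-case runs: an outer loop that finds each run's end and emits its interval immediately, with no special-case for the empty string and no trailing append.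
import Mathlib
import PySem

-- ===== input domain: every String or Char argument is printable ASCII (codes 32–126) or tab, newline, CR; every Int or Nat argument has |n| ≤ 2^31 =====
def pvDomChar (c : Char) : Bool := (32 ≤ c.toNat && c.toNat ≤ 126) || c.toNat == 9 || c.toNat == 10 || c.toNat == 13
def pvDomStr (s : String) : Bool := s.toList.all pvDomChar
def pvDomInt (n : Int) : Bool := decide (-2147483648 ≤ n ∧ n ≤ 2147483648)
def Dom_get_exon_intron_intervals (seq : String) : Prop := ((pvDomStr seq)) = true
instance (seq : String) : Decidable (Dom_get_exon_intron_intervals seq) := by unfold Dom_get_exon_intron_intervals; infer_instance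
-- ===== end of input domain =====

-- B replaces A's previous-type state machine by direct scanning of maximal same-case runs (objective: simpler).


-- ===== PORT A =====
-- A's loop body: flush (start, i, current_type) and restart when the char's type changes
def pvStepA (st : List (Int × Int × String) × Int × String) (p : Int × Char) :
    List (Int × Int × String) × Int × String :=
  let char_type := if PySem.Chars.isupper p.2 then "exon" else "intron"
  if char_type ≠ st.2.2 then (st.1 ++ [(st.2.1, p.1, st.2.2)], p.1, char_type) else st

-- literal port of A: empty guard, current_type from seq[0], fold over enumerate(seq), final flush append
def pvA (l : List Char) : List (Int × Int × String) :=
  match l with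
  | [] => []
  | c0 :: _ =>
    let st := (PySem.List.enumerate l).foldl pvStepA
      (([] : List (Int × Int × String)), (0 : Int), if PySem.Chars.isupper c0 then "exon" else "intron")
    st.1 ++ [(st.2.1, (l.length : Int), st.2.2)]

def get_exon_intron_intervals (seq : String) : List (Int × Int × String) :=
  pvA seq.toList

-- ===== PORT B =====
-- port of B's run scanner: emit the interval of the maximal same-case run at pos, recurse past it
def pvRunGo (pos : Int) (l : List Char) : List (Int × Int × String) :=
  match l with
  | [] => []
  | c :: rest0 =>
    let run := rest0.takeWhile (fun d => PySem.Chars.isupper d == PySem.Chars.isupper c)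
    let endPos : Int := pos + 1 + run.length
    (pos, endPos, if PySem.Chars.isupper c then "exon" else "intron") ::
      pvRunGo endPos (rest0.dropWhile (fun d => PySem.Chars.isupper d == PySem.Chars.isupper c))
termination_by l.length
decreasing_by
  simp only [List.length_cons]
  exact Nat.lt_succ_of_le (List.length_dropWhile_le _ _)

def get_exon_intron_intervals_alt (seq : String) : List (Int × Int × String) :=
  pvRunGo 0 seq.toList

-- ===== PRECONDITION & SPEC =====
def Spec_get_exon_intron_intervals (seq : String) (out : List (Int × Int × String)) : Prop := out = get_exon_intron_intervals_alt seq
instance (seq : String) (out : List (Int × Int × String)) : Decidable (Spec_get_exon_intron_intervals seq out) := by unfold Spec_get_exon_intron_intervals; infer_instance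

-- ===== CLAIM (what is proved, stated in full; the proofs are below) =====
def Claim_equal_get_exon_intron_intervals : Prop := ∀ (seq : String), Dom_get_exon_intron_intervals seq → Spec_get_exon_intron_intervals seq (get_exon_intron_intervals seq)

-- ===== LEMMAS AND PROOFS =====

-- canonical char-by-char recursion both ports are reduced to
def pvCanon (s : Int) (cur : String) (i : Int) (l : List Char) : List (Int × Int × String) :=
  match l with
  | [] => [(s, i, cur)]
  | c :: tl =>
    let t := if PySem.Chars.isupper c then "exon" else "intron"
    if t = cur then pvCanon s cur (i + 1) tl
    else (s, i, cur) :: pvCanon i t (i + 1) tl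

theorem pvFoldA_eq_canon (l : List Char) :
    ∀ (ivs : List (Int × Int × String)) (s : Int) (cur : String) (i : Int),
      (let st := (PySem.List.enumerate l i).foldl pvStepA (ivs, s, cur)
       st.1 ++ [(st.2.1, i + (l.length : Int), st.2.2)]) = ivs ++ pvCanon s cur i l := by
  induction l with
  | nil => intro ivs s cur i; simp [pvCanon, PySem.List.enumerate_nil]
  | cons c tl ih =>
    intro ivs s cur i
    simp only [PySem.List.enumerate_cons, List.foldl_cons, pvCanon, List.length_cons]
    push_cast
    rw [show i + ((tl.length : Int) + 1) = (i + 1) + (tl.length : Int) by ring]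
    by_cases h : (if PySem.Chars.isupper c then "exon" else "intron") = cur
    · simp only [pvStepA, h, if_neg (fun hn : cur ≠ cur => hn rfl), if_pos rfl]
      exact ih ivs s cur (i + 1)
    · simp only [pvStepA, if_pos h, if_neg h]
      rw [ih (ivs ++ [(s, i, cur)]) i (if PySem.Chars.isupper c then "exon" else "intron") (i + 1),
        List.append_assoc]
      simp

theorem pvCanon_eq_runGo (l : List Char) :
    ∀ (s i : Int) (b : Bool),
      pvCanon s (if b then "exon" else "intron") i l =
        (s, i + ((l.takeWhile (fun d => PySem.Chars.isupper d == b)).length : Int),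
          if b then "exon" else "intron") ::
          pvRunGo (i + ((l.takeWhile (fun d => PySem.Chars.isupper d == b)).length : Int))
            (l.dropWhile (fun d => PySem.Chars.isupper d == b)) := by
  induction l with
  | nil => intro s i b; simp [pvCanon, pvRunGo]
  | cons c tl ih =>
    intro s i b
    by_cases h : PySem.Chars.isupper c = b
    · have hty : (if PySem.Chars.isupper c then "exon" else "intron")
          = (if b then "exon" else "intron") := by rw [h]
      simp only [pvCanon, hty, List.takeWhile_cons, List.dropWhile_cons, h,
        beq_self_eq_true, if_pos trivial, List.length_cons]
      push_cast
      rw [show i + (((tl.takeWhile (fun d => PySem.Chars.isupper d == b)).length : Int) + 1)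
          = (i + 1) + ((tl.takeWhile (fun d => PySem.Chars.isupper d == b)).length : Int) by ring]
      exact ih s (i + 1) b
    · have hne : (if PySem.Chars.isupper c then "exon" else "intron")
          ≠ (if b then "exon" else "intron") := by
        cases hb : PySem.Chars.isupper c <;> cases b <;> simp_all
      have hbeq : (PySem.Chars.isupper c == b) = false := by simp [h]
      simp only [pvCanon, if_neg hne, List.takeWhile_cons, List.dropWhile_cons, hbeq,
        Bool.false_eq_true, if_neg (fun hf : False => hf)]
      rw [ih i (i + 1) (PySem.Chars.isupper c)]
      simp only [pvRunGo, List.length_nil, Int.natCast_zero, add_zero]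

-- ===== VERDICT (by name: the statement is the Claim_ definition above) =====
theorem get_exon_intron_intervals_spec : Claim_equal_get_exon_intron_intervals := by
  intro seq _
  unfold Spec_get_exon_intron_intervals get_exon_intron_intervals get_exon_intron_intervals_alt
  cases seq.toList with
  | nil => simp [pvA, pvRunGo]
  | cons c0 tl =>
    have hA := pvFoldA_eq_canon (c0 :: tl) [] 0 (if PySem.Chars.isupper c0 then "exon" else "intron") 0
    simp only [List.nil_append, zero_add] at hA
    show ((PySem.List.enumerate (c0 :: tl) 0).foldl pvStepA
        ([], 0, if PySem.Chars.isupper c0 then "exon" else "intron")).1 ++ _ = _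
    rw [hA, pvCanon_eq_runGo (c0 :: tl) 0 0 (PySem.Chars.isupper c0)]
    simp only [List.takeWhile_cons, List.dropWhile_cons, beq_self_eq_true, if_pos trivial,
      List.length_cons, pvRunGo, zero_add]
    push_cast
    ring_nf
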